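-- pv_equiv track=rewrite | github.com/bzinberg/playbx_progchal | hailey_readability.py | is_sorted_wrt
-- ===== SOURCE A (Python) =====
-- import collections
--
-- def is_sorted_wrt(s, p):
--   p_hash = collections.defaultdict(lambda: None)
--   for i in range(len(p)):
--     p_hash[p[i]] = i
--
--   s_index = [p_hash[x] for x in s if p_hash[x] is not None]
--   prev_n = 0
--   for n in s_index:
--     if n < prev_n:
--       return False
--     prev_n = n
--
--   return True
-- ===== SOURCE B (Python) =====
-- def is_sorted_wrt(s, p):
--   idx = {c: i for i, c in enumerate(p)}
--   s_index = [idx[x] for x in s if x in idx]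
--   return s_index == sorted(s_index)
-- ===== Notes on version B (the rewrite author's own statement) =====
-- stated objective: simpler
-- what changed: The explicit prev-tracking scan loop is replaced by a sort-then-compare monotonicity check (s_index == sorted(s_index)), and the defaultdict/range index loop by a plain dict comprehension over enumerate.
import Mathlib
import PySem

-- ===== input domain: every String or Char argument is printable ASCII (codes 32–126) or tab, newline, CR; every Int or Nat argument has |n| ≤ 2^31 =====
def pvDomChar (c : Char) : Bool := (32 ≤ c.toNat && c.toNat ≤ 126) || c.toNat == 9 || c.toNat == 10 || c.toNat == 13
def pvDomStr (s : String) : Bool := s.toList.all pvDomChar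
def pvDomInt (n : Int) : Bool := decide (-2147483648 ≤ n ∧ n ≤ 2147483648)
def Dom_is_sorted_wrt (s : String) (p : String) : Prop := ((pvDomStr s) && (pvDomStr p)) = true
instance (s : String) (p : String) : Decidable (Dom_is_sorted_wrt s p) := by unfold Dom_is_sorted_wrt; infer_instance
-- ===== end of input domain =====

-- B replaces A's explicit prev-tracking scan by a sort-then-compare check and the
-- defaultdict/range loop by a dict comprehension over enumerate (objective: simpler).

-- ===== PORT A =====
-- 'for n in s_index: if n < prev_n: return False; prev_n = n'
def iswScan : List Int → Int → Bool
  | [], _ => true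
  | n :: rest, prev_n => if n < prev_n then false else iswScan rest n

def is_sorted_wrt (s : String) (p : String) : Bool :=
  let pl := p.toList
  -- 'for i in range(len(p)): p_hash[p[i]] = i'  (p[i] is always in range, so pyGet? is always some)
  let p_hash : PySem.Dict Char Int :=
    (PySem.List.pyRange 0 (pl.length : Int) 1).foldl
      (fun d i =>
        match PySem.List.pyGet? pl i with
        | some c => d.insert c i
        | none => d)
      PySem.Dict.empty
  -- '[p_hash[x] for x in s if p_hash[x] is not None]' (defaultdict: missing key reads as None)
  let s_index := s.toList.filterMap (fun x => p_hash.get? x)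
  iswScan s_index 0

-- ===== PORT B =====
def is_sorted_wrt_alt (s : String) (p : String) : Bool :=
  -- 'idx = {c: i for i, c in enumerate(p)}'
  let idx : PySem.Dict Char Int :=
    (PySem.List.enumerate p.toList 0).foldl (fun d ic => d.insert ic.2 ic.1) PySem.Dict.empty
  -- '[idx[x] for x in s if x in idx]'
  let s_index := s.toList.filterMap (fun x => idx.get? x)
  -- 's_index == sorted(s_index)'
  s_index == PySem.List.sorted s_index (fun x => x) false

-- ===== PRECONDITION & SPEC =====
def Spec_is_sorted_wrt (s : String) (p : String) (out : Bool) : Prop := out = is_sorted_wrt_alt s p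
instance (s : String) (p : String) (out : Bool) : Decidable (Spec_is_sorted_wrt s p out) := by unfold Spec_is_sorted_wrt; infer_instance

-- ===== CLAIM (what is proved, stated in full; the proofs are below) =====
def Claim_equal_is_sorted_wrt : Prop := ∀ (s : String) (p : String), Dom_is_sorted_wrt s p → Spec_is_sorted_wrt s p (is_sorted_wrt s p)

-- ===== LEMMAS AND PROOFS =====

-- The two index dictionaries are the same fold.
theorem isw_dict_eq (pl : List Char) :
    (PySem.List.pyRange 0 (pl.length : Int) 1).foldl
      (fun d i =>
        match PySem.List.pyGet? pl i with
        | some c => d.insert c i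
        | none => d)
      PySem.Dict.empty
    = (PySem.List.enumerate pl 0).foldl (fun d ic => d.insert ic.2 ic.1) PySem.Dict.empty := by
  rw [PySem.List.enumerate_eq_map_pyRange pl 'a', List.foldl_map]
  refine PySem.List.foldl_congr_mem _ _ _ _ ?_
  intro d i hi
  rcases (PySem.List.mem_pyRange_one.mp hi) with ⟨h0, hl⟩
  have hlt : i.toNat < pl.length := by omega
  rw [PySem.List.pyGet?_of_nonneg pl h0, List.getElem?_eq_getElem hlt]
  simp [PySem.List.pyGetD, PySem.List.pyGet?_of_nonneg pl h0, List.getElem?_eq_getElem hlt]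

-- Every value stored by the enumerate fold is a nonnegative index.
theorem isw_values_nonneg (pl : List Char) (st : Int) (hst : 0 ≤ st)
    (d : PySem.Dict Char Int) (hd : ∀ c v, d.get? c = some v → 0 ≤ v) :
    ∀ c v, ((PySem.List.enumerate pl st).foldl (fun d ic => d.insert ic.2 ic.1) d).get? c = some v → 0 ≤ v := by
  induction pl generalizing st d with
  | nil => simpa [PySem.List.enumerate_nil] using hd
  | cons x xs ih =>
      rw [PySem.List.enumerate_cons]
      refine ih (st + 1) (by omega) _ ?_
      intro c v hv
      change (d.insert x st).get? c = some v at hv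
      by_cases hc : c = x
      · subst hc
        rw [PySem.Dict.get?_insert_self] at hv
        simp only [Option.some.injEq] at hv
        omega
      · rw [PySem.Dict.get?_insert_of_ne _ _ hc] at hv
        exact hd c v hv

-- A's scan is the chain condition.
theorem isw_scan_iff (l : List Int) (prev : Int) :
    iswScan l prev = true ↔ List.IsChain (· ≤ ·) (prev :: l) := by
  induction l generalizing prev with
  | nil => simp [iswScan]
  | cons n rest ih =>
      by_cases h : n < prev
      · simp only [iswScan, if_pos h, List.isChain_cons_cons]
        constructor
        · intro hf; cases hf
        · intro ⟨hle, _⟩; omega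
      · simp only [iswScan, if_neg h, ih, List.isChain_cons_cons]
        constructor
        · intro hch; exact ⟨by omega, hch⟩
        · intro ⟨_, hch⟩; exact hch

-- B's sort-then-compare is the pairwise condition.
theorem isw_sorted_iff (l : List Int) :
    (l == PySem.List.sorted l (fun x => x) false) = true ↔ l.Pairwise (· ≤ ·) := by
  rw [beq_iff_eq]
  constructor
  · intro h
    have := PySem.List.sorted_pairwise l (fun x => x) (κ := Int)
    rw [← h] at this
    exact this
  · intro h
    exact (PySem.List.sorted_eq_self_of_pairwise l (fun x => x) h).symm

-- ===== VERDICT (by name: the statement is the Claim_ definition above) =====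
theorem is_sorted_wrt_spec : Claim_equal_is_sorted_wrt := by
  intro s p _
  unfold Spec_is_sorted_wrt
  simp only [is_sorted_wrt, is_sorted_wrt_alt]
  rw [isw_dict_eq]
  set d := (PySem.List.enumerate p.toList 0).foldl (fun d ic => d.insert ic.2 ic.1) PySem.Dict.empty with hd
  set L := s.toList.filterMap (fun x => d.get? x) with hL
  have hnn : ∀ x ∈ L, 0 ≤ x := by
    intro x hx
    rcases List.mem_filterMap.mp (hL ▸ hx) with ⟨c, _, hc⟩
    exact isw_values_nonneg p.toList 0 le_rfl _ (by simp [PySem.Dict.get?_empty]) c x hc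
  have : iswScan L 0 = true ↔ (L == PySem.List.sorted L (fun x => x) false) = true := by
    rw [isw_scan_iff, isw_sorted_iff, List.isChain_iff_pairwise, List.pairwise_cons]
    constructor
    · exact fun h => h.2
    · exact fun h => ⟨hnn, h⟩
  exact Bool.eq_iff_iff.mpr this
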